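-- pv_equiv track=rewrite | github.com/rureirureirurei/DistributedLab-homework | hw2/int_hex.py | HEX_2_little_endian
-- ===== SOURCE A (Python) =====
-- N = 2 # number of bytes in hex value
--
-- def HEX_2_little_endian(val):
--     result = 0
--     pow16 = 1
--     for index in range(2, len(val), N):
--         result += int("0x" + val[index + 1], 0) * pow16
--         pow16 *= 16
--         result += int("0x" + val[index], 0) * pow16
--         pow16 *= 16
--     return result
-- ===== SOURCE B (Python) =====
-- def HEX_2_little_endian(val):
--     return int.from_bytes(bytes.fromhex(val[2:]), 'little')
-- ===== Notes on version B (the rewrite author's own statement) =====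
-- stated objective: idiomatic
-- what changed: Replaces the manual per-nibble positional accumulation loop (running result and growing pow16) with slicing off the first two characters, decoding the hex digits to a byte string via bytes.fromhex, and reinterpreting it as a little-endian integer with int.from_bytes.
import Mathlib
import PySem

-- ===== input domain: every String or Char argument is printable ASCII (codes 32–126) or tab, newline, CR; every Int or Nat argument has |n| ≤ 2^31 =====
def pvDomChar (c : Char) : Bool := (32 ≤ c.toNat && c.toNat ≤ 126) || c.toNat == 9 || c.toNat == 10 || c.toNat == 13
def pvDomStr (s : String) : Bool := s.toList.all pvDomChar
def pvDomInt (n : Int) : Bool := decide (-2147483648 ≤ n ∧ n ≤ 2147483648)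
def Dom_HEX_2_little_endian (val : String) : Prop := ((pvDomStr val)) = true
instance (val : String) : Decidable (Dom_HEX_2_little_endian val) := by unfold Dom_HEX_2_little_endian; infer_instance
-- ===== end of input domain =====

-- B replaces A's per-nibble positional accumulation loop by decoding the hex digits
-- after the first two characters into a byte list and folding it little-endian (idiomatic).

-- value of a single hex-digit character; exact for Python's int("0x"+c, 0) (A) and for
-- the nibble decoding of bytes.fromhex (B) on the hex-digit characters Pre_ admits
def pvNib (c : Char) : Int :=
  if c.isDigit then (c.toNat : Int) - 48
  else if 'a' ≤ c ∧ c ≤ 'f' then (c.toNat : Int) - 87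
  else if 'A' ≤ c ∧ c ≤ 'F' then (c.toNat : Int) - 55
  else 0

-- ===== PORT A =====
def HEX_2_little_endian (val : String) : Int :=
  let cs := val.toList
  (((PySem.List.pyRange 2 cs.length 2).foldl
    (fun (st : Int × Int) index =>
      let result := st.1 + pvNib (PySem.List.pyGetD cs (index + 1) '0') * st.2
      let pow16 := st.2 * 16
      let result := result + pvNib (PySem.List.pyGetD cs index '0') * pow16
      (result, pow16 * 16)) (0, 1))).1

-- ===== PORT B =====
-- bytes.fromhex: consume the hex digits two at a time, each pair one byte
def pvFromHex : List Char → List Int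
  | hi :: lo :: rest => (pvNib hi * 16 + pvNib lo) :: pvFromHex rest
  | _ => []

-- int.from_bytes(_, 'little')
def HEX_2_little_endian_alt (val : String) : Int :=
  (pvFromHex (val.toList.drop 2)).foldr (fun b acc => b + 256 * acc) 0

-- ===== PRECONDITION & SPEC =====
-- Exactly the inputs on which Python A returns: either too short to enter the loop, or an
-- even-length string whose characters after the first two are all hex digits (otherwise A
-- raises IndexError on the odd tail or ValueError in int("0x"+c, 0) on a non-hex char).
def Pre_HEX_2_little_endian (val : String) : Prop :=
  val.toList.length < 2 ∨
    (val.toList.length % 2 = 0 ∧ (val.toList.drop 2).all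
      (fun c => (48 ≤ c.toNat && c.toNat ≤ 57) || (97 ≤ c.toNat && c.toNat ≤ 102) ||
        (65 ≤ c.toNat && c.toNat ≤ 70)) = true)
instance (val : String) : Decidable (Pre_HEX_2_little_endian val) := by
  unfold Pre_HEX_2_little_endian; infer_instance

def pvWitness_HEX_2_little_endian : String := "0x12"

def Spec_HEX_2_little_endian (val : String) (out : Int) : Prop := out = HEX_2_little_endian_alt val
instance (val : String) (out : Int) : Decidable (Spec_HEX_2_little_endian val out) := by unfold Spec_HEX_2_little_endian; infer_instance

-- ===== CLAIM (what is proved, stated in full; the proofs are below) =====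
def Claim_equal_HEX_2_little_endian : Prop := ∀ (val : String), Dom_HEX_2_little_endian val → Pre_HEX_2_little_endian val → Spec_HEX_2_little_endian val (HEX_2_little_endian val)

-- ===== LEMMAS AND PROOFS =====

-- A's loop body, for stating the invariant
def pvStep (cs : List Char) (st : Int × Int) (index : Int) : Int × Int :=
  let result := st.1 + pvNib (PySem.List.pyGetD cs (index + 1) '0') * st.2
  let pow16 := st.2 * 16
  let result := result + pvNib (PySem.List.pyGetD cs index '0') * pow16
  (result, pow16 * 16)

-- loop invariant: running A's loop over indices j, j+2, …, j+2(m-1) adds p times the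
-- little-endian value of the bytes decoded from cs.drop j, and multiplies pow16 by 16^(2m)
theorem pvLoop (cs : List Char) (m : Nat) : ∀ (j : Nat) (r p : Int), j + 2 * m = cs.length →
    ((List.range m).map (fun k : Nat => ((j : Int) + 2 * (k : Int)))).foldl (pvStep cs) (r, p) =
      (r + p * (pvFromHex (cs.drop j)).foldr (fun b acc => b + 256 * acc) 0, p * 16 ^ (2 * m)) := by
  induction m with
  | zero =>
    intro j r p h
    have : cs.drop j = [] := List.drop_eq_nil_of_le (by omega)
    simp [this, pvFromHex]
  | succ m ih =>
    intro j r p h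
    have hj1 : j + 1 < cs.length := by omega
    have hj : j < cs.length := by omega
    have hd : cs.drop j = cs[j] :: cs[j+1] :: cs.drop (j + 2) := by
      rw [List.drop_eq_getElem_cons hj, List.drop_eq_getElem_cons hj1]
    rw [List.range_succ_eq_map]
    simp only [List.map_cons, List.map_map, List.foldl_cons, Nat.cast_zero, mul_zero, add_zero]
    have hmap : ((List.range m).map ((fun k : Nat => ((j : Int) + 2 * (k : Int))) ∘ Nat.succ)) =
        (List.range m).map (fun k : Nat => (((j + 2 : Nat) : Int) + 2 * (k : Int))) := by
      apply List.map_congr_left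
      intro k _
      simp only [Function.comp_apply]
      push_cast
      ring
    rw [hmap, ih (j + 2) _ _ (by omega)]
    have e1 : PySem.List.pyGetD cs ((j : Int) + 1) '0' = cs[j+1] := by
      have h' : ((j : Int) + 1) = ((j + 1 : Nat) : Int) := by push_cast; ring
      rw [h', PySem.List.pyGetD_natCast, List.getD_eq_getElem?_getD,
        List.getElem?_eq_getElem hj1, Option.getD_some]
    have e0 : PySem.List.pyGetD cs ((j : Int)) '0' = cs[j] := by
      rw [PySem.List.pyGetD_natCast, List.getD_eq_getElem?_getD,
        List.getElem?_eq_getElem hj, Option.getD_some]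
    simp only [pvStep, e0, e1, hd, pvFromHex, List.foldr_cons]
    rw [Prod.mk.injEq]
    refine ⟨by ring, ?_⟩
    have : 2 * (m + 1) = 2 * m + 2 := by ring
    rw [this, pow_add]
    ring

theorem pvRange_eq (n : Nat) (hn : 2 ≤ n) (he : n % 2 = 0) :
    PySem.List.pyRange 2 (n : Int) 2 = (List.range ((n - 2) / 2)).map (fun k : Nat => (((2 : Nat) : Int) + 2 * (k : Int))) := by
  rw [PySem.List.pyRange_of_pos 2 (n : Int) (by norm_num)]
  rcases Nat.lt_or_ge 2 n with h | h
  · rw [if_pos (by exact_mod_cast h)]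
    have hc : (((n : Int) - 2 + 2 - 1) / 2).toNat = (n - 2) / 2 := by omega
    rw [hc]
    norm_num
  · have hn2 : n = 2 := by omega
    subst hn2
    norm_num

-- ===== VERDICT (by name: the statement is the Claim_ definition above) =====
theorem HEX_2_little_endian_spec : Claim_equal_HEX_2_little_endian := by
  intro val _ hpre
  unfold Pre_HEX_2_little_endian at hpre
  show ((PySem.List.pyRange 2 (val.toList.length : Int) 2).foldl (pvStep val.toList) (0, 1)).1
      = (pvFromHex (val.toList.drop 2)).foldr (fun b acc => b + 256 * acc) 0
  rcases Nat.lt_or_ge val.toList.length 2 with h | h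
  · have hr : PySem.List.pyRange 2 (val.toList.length : Int) 2 = [] := by
      rw [PySem.List.pyRange_of_pos 2 _ (by norm_num)]
      rw [if_neg (by exact_mod_cast Nat.not_lt.mpr (by omega : val.toList.length ≤ 2))]
      simp
    have hd : val.toList.drop 2 = [] := List.drop_eq_nil_of_le (by omega)
    rw [hr]
    simp [hd, pvFromHex]
  · have he : val.toList.length % 2 = 0 := by
      rcases hpre with h' | h'
      · omega
      · exact h'.1
    have hm : 2 + 2 * ((val.toList.length - 2) / 2) = val.toList.length := by omega
    rw [pvRange_eq val.toList.length h he,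
      pvLoop val.toList ((val.toList.length - 2) / 2) 2 0 1 hm]
    simp
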